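-- pv_equiv track=rewrite | github.com/jak010/tpjt-tradingview-scrapper | lib/websocket/utils.py | cut_of_range_by_number
-- ===== SOURCE A (Python) =====
-- from typing import List, NoReturn
--
-- def cut_of_range_by_number(symbol_names: List[str], max_worker):
--     # MAX CORE 만큼 인덱싱 처리하기
--
--     count = 0
--     remainder = len(symbol_names) // max_worker
--     divider = len(symbol_names) % max_worker
--
--     index_range = []
--     for idx, value in enumerate(symbol_names, start=1):
--         if idx % max_worker == 0:
--             start_index = count * max_worker
--             end_index = idx
--             index_range.append((start_index, end_index))
--             count += 1
--
--             if count == remainder: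
--                 start_index = count * max_worker
--                 end_index = start_index + divider
--
--                 index_range.append((start_index, end_index))
--     return index_range
-- ===== SOURCE B (Python) =====
-- def cut_of_range_by_number(symbol_names, max_worker):
--     # Direct arithmetic over the number of chunks instead of scanning every element.
--     n = len(symbol_names)
--     q, r = divmod(n, max_worker)
--     index_range = [(k * max_worker, (k + 1) * max_worker) for k in range(q)]
--     if q >= 1:
--         index_range.append((q * max_worker, q * max_worker + r))
--     return index_range
-- ===== Notes on version B (the rewrite author's own statement) =====
-- stated objective: faster
-- what changed: B computes the chunk list directly from divmod(len, max_worker), looping only over the number of chunks, instead of A's enumerate scan over every element that tests idx % max_worker == 0.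
-- outside the precondition, e.g. on cut_of_range_by_number(['a', 'b'], 0): A raises ZeroDivisionError, B raises ZeroDivisionError; on cut_of_range_by_number(['a', 'b'], -2): A returns [(0, 2)], B returns []
import Mathlib
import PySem

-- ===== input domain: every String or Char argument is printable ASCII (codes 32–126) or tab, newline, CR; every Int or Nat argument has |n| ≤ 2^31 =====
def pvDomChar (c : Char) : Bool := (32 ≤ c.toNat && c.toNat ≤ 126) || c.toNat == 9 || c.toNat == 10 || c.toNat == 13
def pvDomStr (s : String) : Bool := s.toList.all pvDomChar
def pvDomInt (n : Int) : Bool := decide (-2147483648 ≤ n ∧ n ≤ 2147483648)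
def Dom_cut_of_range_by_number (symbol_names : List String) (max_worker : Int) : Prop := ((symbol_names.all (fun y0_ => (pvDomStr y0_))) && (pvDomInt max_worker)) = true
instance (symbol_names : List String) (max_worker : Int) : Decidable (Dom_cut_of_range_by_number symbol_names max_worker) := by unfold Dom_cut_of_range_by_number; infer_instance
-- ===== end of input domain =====

-- B replaces A's scan over every element by a direct arithmetic loop over the chunk indices (objective: faster; fewer iterations when max_worker > 1).

-- ===== PORT A =====
-- loop body of A's for-loop; state = (count, index_range); the enumerated string value is unused
def cutStepA (max_worker remainder divider : Int) (st : Int × List (Int × Int)) (idx : Int) : Int × List (Int × Int) :=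
  if PySem.Int.mod idx max_worker = 0 then
    let index_range := st.2 ++ [(st.1 * max_worker, idx)]
    let count := st.1 + 1
    let index_range :=
      if count = remainder then
        index_range ++ [(count * max_worker, count * max_worker + divider)]
      else index_range
    (count, index_range)
  else st

def cut_of_range_by_number (symbol_names : List String) (max_worker : Int) : List (Int × Int) :=
  let remainder := PySem.Int.floordiv (symbol_names.length : Int) max_worker
  let divider := PySem.Int.mod (symbol_names.length : Int) max_worker
  ((PySem.List.enumerate symbol_names 1).foldl
      (fun st p => cutStepA max_worker remainder divider st p.1) (0, [])).2

-- ===== PORT B =====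
def cut_of_range_by_number_alt (symbol_names : List String) (max_worker : Int) : List (Int × Int) :=
  let n : Int := symbol_names.length
  let q := PySem.Int.floordiv n max_worker
  let r := PySem.Int.mod n max_worker
  let index_range := (PySem.List.pyRange 0 q 1).map (fun k => (k * max_worker, (k + 1) * max_worker))
  if 1 ≤ q then index_range ++ [(q * max_worker, q * max_worker + r)] else index_range

-- ===== PRECONDITION & SPEC =====
-- Pre_ excludes max_worker = 0, where A raises ZeroDivisionError (B raises too), and the
-- negative max_worker — not a meaningful worker count — on which A happens to return chunks
-- with negative start indices while B returns []; negative max_worker with a list shorter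
-- than |max_worker| stays inside Pre_ (there both return []).
def Pre_cut_of_range_by_number (symbol_names : List String) (max_worker : Int) : Prop :=
  1 ≤ max_worker ∨ (max_worker ≤ -1 ∧ (symbol_names.length : Int) < -max_worker)
instance (symbol_names : List String) (max_worker : Int) : Decidable (Pre_cut_of_range_by_number symbol_names max_worker) := by unfold Pre_cut_of_range_by_number; infer_instance
def pvWitness_cut_of_range_by_number : List String × Int := (["a", "b", "c", "d", "e"], 2)
def Spec_cut_of_range_by_number (symbol_names : List String) (max_worker : Int) (out : List (Int × Int)) : Prop := out = cut_of_range_by_number_alt symbol_names max_worker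
instance (symbol_names : List String) (max_worker : Int) (out : List (Int × Int)) : Decidable (Spec_cut_of_range_by_number symbol_names max_worker out) := by unfold Spec_cut_of_range_by_number; infer_instance

-- ===== CLAIM (what is proved, stated in full; the proofs are below) =====
def Claim_equal_cut_of_range_by_number : Prop := ∀ (symbol_names : List String) (max_worker : Int), Dom_cut_of_range_by_number symbol_names max_worker → Pre_cut_of_range_by_number symbol_names max_worker → Spec_cut_of_range_by_number symbol_names max_worker (cut_of_range_by_number symbol_names max_worker)

-- ===== LEMMAS AND PROOFS =====

-- closed form of A's loop state after the first m iterations (M = max_worker, n = total length)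
def cutClosed (M n m : Nat) : Int × List (Int × Int) :=
  (((m / M : Nat) : Int),
    (List.range (m / M)).map (fun k => (((k : Nat) : Int) * M, (((k : Nat) : Int) + 1) * M)) ++
      (if m / M = n / M ∧ 1 ≤ n / M then
        [(((n / M : Nat) : Int) * M, ((n / M : Nat) : Int) * M + ((n % M : Nat) : Int))]
      else []))

-- when no index in the list is divisible by max_worker, A's loop leaves its state unchanged
lemma cut_loop_id (mw remainder divider : Int) :
    ∀ (l : List Int) (st : Int × List (Int × Int)),
      (∀ i ∈ l, PySem.Int.mod i mw ≠ 0) → l.foldl (cutStepA mw remainder divider) st = st := by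
  intro l
  induction l with
  | nil => intro st _; rfl
  | cons x t iht =>
    intro st hmem
    simp only [List.foldl_cons]
    rw [show cutStepA mw remainder divider st x = st by
      unfold cutStepA; rw [if_neg (hmem x (List.mem_cons_self))]]
    exact iht st (fun i hi => hmem i (List.mem_cons_of_mem x hi))

lemma cut_loop_inv (M n : Nat) :
    ∀ m, m ≤ n →
      (PySem.List.pyRange 1 (1 + (m : Int)) 1).foldl
        (cutStepA (M : Int) (((n / M : Nat) : Int)) (((n % M : Nat) : Int))) (0, []) =
      cutClosed M n m := by
  intro m
  induction m with
  | zero =>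
    intro _
    rw [show (1 + ((0:Nat) : Int)) = 1 by norm_num, PySem.List.pyRange_one_eq_nil (by omega)]
    simp only [cutClosed, Nat.zero_div, List.range_zero, List.map_nil, List.nil_append, List.foldl_nil]
    have : ¬ (0 = n / M ∧ 1 ≤ n / M) := by omega
    rw [if_neg this]
    simp
  | succ m ih =>
    intro hmn
    have h1 : (1 + ((m + 1 : Nat) : Int)) = (1 + (m : Nat)) + 1 := by push_cast; ring
    rw [h1, PySem.List.pyRange_one_succ_right (by omega), List.foldl_append, ih (by omega)]
    simp only [List.foldl_cons, List.foldl_nil]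
    have hidx : (1 + (m : Int)) = ((m + 1 : Nat) : Int) := by push_cast; ring
    rw [hidx]
    simp only [cutStepA, PySem.Int.mod_natCast]
    by_cases hdvd : (m + 1) % M = 0
    · have hdvd' : M ∣ (m + 1) := Nat.dvd_of_mod_eq_zero hdvd
      have hsucc : (m + 1) / M = m / M + 1 := by
        rw [Nat.succ_div, if_pos hdvd']
      have hmul : (m + 1) = (m / M + 1) * M := by
        rw [← hsucc]; exact (Nat.div_mul_cancel hdvd').symm
      have hlt : m / M + 1 ≤ n / M := by
        rw [← hsucc]; exact Nat.div_le_div_right hmn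
      rw [if_pos (by exact_mod_cast hdvd)]
      simp only [cutClosed, hsucc]
      rw [if_neg (by omega : ¬ (m / M = n / M ∧ 1 ≤ n / M))]
      have hcount : ((m / M : Nat) : Int) + 1 = (((m / M + 1 : Nat)) : Int) := by push_cast; ring
      have hchunk : ((m + 1 : Nat) : Int) = (((m / M : Nat) : Int) + 1) * M := by
        exact_mod_cast congrArg (Nat.cast : Nat → Int) hmul
      by_cases hq : m / M + 1 = n / M
      · have hq1 : 1 ≤ n / M := hq ▸ Nat.le_add_left 1 (m / M)
        have hq' : ((m / M : Nat) : Int) + 1 = ((n / M : Nat) : Int) := by exact_mod_cast hq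
        rw [if_pos (hcount.trans (congrArg (Nat.cast : Nat → Int) hq))]
        rw [if_pos ⟨hq, hq1⟩]
        rw [List.range_succ, List.map_append]
        refine Prod.ext hcount ?_
        simp only [hchunk, List.map_cons, List.map_nil, List.append_nil, List.append_assoc]
        rw [← hq']
      · rw [if_neg (by rw [hcount]; intro hc; exact hq (by exact_mod_cast hc))]
        rw [if_neg (by omega : ¬ (m / M + 1 = n / M ∧ 1 ≤ n / M))]
        rw [List.range_succ, List.map_append]
        refine Prod.ext hcount ?_
        simp [hchunk]
    · have hsucc : (m + 1) / M = m / M := by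
        rw [Nat.succ_div, if_neg (fun h => hdvd (Nat.dvd_iff_mod_eq_zero.mp h)), Nat.add_zero]
      rw [if_neg (by exact_mod_cast hdvd)]
      simp only [cutClosed, hsucc]

-- ===== VERDICT (by name: the statement is the Claim_ definition above) =====
-- the enumerated string components are unused: fold over the index list instead
lemma cut_fold_fst (mw remainder divider : Int) :
    ∀ (l : List (Int × String)) (init : Int × List (Int × Int)),
      List.foldl (fun st p => cutStepA mw remainder divider st p.1) init l
        = List.foldl (cutStepA mw remainder divider) init (l.map (fun p => p.1)) := by
  intro l
  induction l with
  | nil => intro init; rfl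
  | cons x t iht => intro init; simp only [List.foldl_cons, List.map_cons]; exact iht _

theorem cut_of_range_by_number_spec : Claim_equal_cut_of_range_by_number := by
  intro xs mw _ hpre
  unfold Pre_cut_of_range_by_number at hpre
  unfold Spec_cut_of_range_by_number
  rcases hpre with hpos | ⟨hneg, hsmall⟩
  case inr =>
    -- negative max_worker, list shorter than |max_worker|: both sides are []
    unfold cut_of_range_by_number cut_of_range_by_number_alt
    simp only
    rw [cut_fold_fst, PySem.List.map_fst_enumerate]
    rw [cut_loop_id _ _ _ _ _ (fun i hi hmod => by
      have hb := PySem.List.mem_pyRange_one.mp hi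
      have hdvd : mw ∣ i := (PySem.Int.mod_eq_zero_iff_dvd i mw).mp hmod
      have habs : -mw ≤ i := Int.le_of_dvd (by omega) ((neg_dvd).mpr hdvd)
      omega)]
    have hq0 : PySem.Int.floordiv (xs.length : Int) mw ≤ 0 := by
      have h1 := PySem.Int.floordiv_mul_add_mod (xs.length : Int) mw
      have h2 := PySem.Int.mod_neg_bounds (a := (xs.length : Int)) (b := mw) (by omega)
      by_contra hq
      push_neg at hq
      have : PySem.Int.floordiv (xs.length : Int) mw * mw ≤ 1 * mw :=
        mul_le_mul_of_nonpos_right (by omega) (by omega)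
      omega
    rw [PySem.List.pyRange_one_eq_nil hq0, if_neg (by omega)]
    simp
  obtain ⟨M, rfl, hM⟩ : ∃ M : Nat, mw = (M : Int) ∧ 0 < M :=
    ⟨mw.toNat, by omega, by omega⟩
  unfold cut_of_range_by_number cut_of_range_by_number_alt
  simp only [PySem.Int.floordiv_natCast, PySem.Int.mod_natCast]
  rw [cut_fold_fst, PySem.List.map_fst_enumerate]
  rw [cut_loop_inv M xs.length xs.length le_rfl]
  simp only [cutClosed]
  simp only [true_and]
  rw [PySem.List.pyRange_zero_nat, List.map_map]
  by_cases hq : 1 ≤ xs.length / M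
  · rw [if_pos hq, if_pos (by exact_mod_cast hq)]
    simp [Function.comp_def]
  · rw [if_neg hq, if_neg (by exact_mod_cast hq)]
    simp [Function.comp_def]
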